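-- pv_equiv track=rewrite | github.com/DougFelipe/biorempp | src/biorempp/utils/enhanced_errors.py | _determine_context
-- ===== SOURCE A (Python) =====
-- def _determine_context(error_message: str, error_type: str) -> str:
--     """Determine error context from error message and type."""
--     error_lower = error_message.lower()
--
--     # Database-related contexts (check first before generic "invalid")
--     if "database" in error_lower and (
--         "invalid" in error_lower or "wrong" in error_lower
--     ):
--         return "invalid_database"
--     elif any(db in error_lower for db in ["biorempp", "hadeg", "kegg", "toxcsm"]):
--         if "database" in error_lower or ".csv" in error_lower:
--             return "database_file"
--         else:
--             return "invalid_database"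
--
--     # File-related contexts
--     elif "input" in error_lower or "sample_data" in error_lower:
--         return "input_file"
--     elif "output" in error_lower or "results" in error_lower:
--         return "output_dir"
--     elif "log" in error_lower:
--         return "log_dir"
--
--     # Data-related contexts
--     elif "column" in error_lower or "key" in error_lower:
--         return "missing_column"
--     elif "empty" in error_lower or "no data" in error_lower:
--         if error_type == "ValueError":
--             return "empty_input"
--         else:
--             return "empty_database"
--
--     # Import-related contexts
--     elif "import" in error_lower or "module" in error_lower:
--         return "missing_dependency"
--
--     # Format-related contexts (check after database contexts)
--     elif "format" in error_lower or "invalid" in error_lower: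
--         return "invalid_format"
--
--     return "general"
-- ===== SOURCE B (Python) =====
-- RANK = [
--     ("biorempp", 1), ("hadeg", 1), ("kegg", 1), ("toxcsm", 1),
--     ("input", 2), ("sample_data", 2),
--     ("output", 3), ("results", 3),
--     ("log", 4),
--     ("column", 5), ("key", 5),
--     ("empty", 6), ("no data", 6),
--     ("import", 7), ("module", 7),
--     ("format", 8), ("invalid", 8),
-- ]
--
-- LABEL = {0: "invalid_database", 2: "input_file", 3: "output_dir", 4: "log_dir",
--          5: "missing_column", 7: "missing_dependency", 8: "invalid_format",
--          9: "general"}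
--
--
-- def _determine_context(error_message: str, error_type: str) -> str:
--     """Determine error context from error message and type."""
--     el = error_message.lower()
--     if "database" in el and ("invalid" in el or "wrong" in el):
--         best = 0
--     else:
--         best = min((r for k, r in RANK if k in el), default=9)
--     if best == 1:
--         return "database_file" if "database" in el or ".csv" in el else "invalid_database"
--     if best == 6:
--         return "empty_input" if error_type == "ValueError" else "empty_database"
--     return LABEL[best]
-- ===== Notes on version B (the rewrite author's own statement) =====
-- stated objective: alternative
-- what changed: Replaces the nine-branch if/elif cascade by a keyword->rank table: B computes the minimum precedence rank over all keywords found in the message (min over a generator, default 9), then dispatches once on that single number via a rank->label dict, with only the two compound decisions (database+invalid/wrong override, and the rank-1/rank-6 sub-decisions) kept as explicit cases.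
import Mathlib
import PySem

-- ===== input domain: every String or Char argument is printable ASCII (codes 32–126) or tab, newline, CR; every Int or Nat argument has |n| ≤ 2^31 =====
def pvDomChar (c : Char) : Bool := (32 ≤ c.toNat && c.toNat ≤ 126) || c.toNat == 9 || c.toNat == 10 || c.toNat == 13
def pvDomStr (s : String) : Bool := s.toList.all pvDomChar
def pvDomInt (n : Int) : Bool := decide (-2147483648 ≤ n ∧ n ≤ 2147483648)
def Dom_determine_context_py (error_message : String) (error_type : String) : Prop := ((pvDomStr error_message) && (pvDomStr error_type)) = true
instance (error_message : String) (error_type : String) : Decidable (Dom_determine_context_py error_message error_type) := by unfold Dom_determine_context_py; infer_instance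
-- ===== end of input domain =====

-- B replaces A's if/elif cascade by a keyword→rank table: it computes the minimum rank of
-- any keyword occurring in the message (9 if none) and dispatches on that single number.

-- ===== PORT A =====
def determine_context_py (error_message : String) (error_type : String) : String :=
  let el := PySem.Str.lower error_message
  if PySem.Str.isIn "database" el &&
      (PySem.Str.isIn "invalid" el || PySem.Str.isIn "wrong" el) then "invalid_database"
  else if ["biorempp", "hadeg", "kegg", "toxcsm"].any (fun db => PySem.Str.isIn db el) then
    if PySem.Str.isIn "database" el || PySem.Str.isIn ".csv" el then "database_file"
    else "invalid_database"
  else if PySem.Str.isIn "input" el || PySem.Str.isIn "sample_data" el then "input_file"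
  else if PySem.Str.isIn "output" el || PySem.Str.isIn "results" el then "output_dir"
  else if PySem.Str.isIn "log" el then "log_dir"
  else if PySem.Str.isIn "column" el || PySem.Str.isIn "key" el then "missing_column"
  else if PySem.Str.isIn "empty" el || PySem.Str.isIn "no data" el then
    if error_type == "ValueError" then "empty_input" else "empty_database"
  else if PySem.Str.isIn "import" el || PySem.Str.isIn "module" el then "missing_dependency"
  else if PySem.Str.isIn "format" el || PySem.Str.isIn "invalid" el then "invalid_format"
  else "general"

-- ===== PORT B =====
-- module-level RANK table: keyword → precedence rank
def pvRANK : List (String × Int) :=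
  [("biorempp", 1), ("hadeg", 1), ("kegg", 1), ("toxcsm", 1),
   ("input", 2), ("sample_data", 2),
   ("output", 3), ("results", 3),
   ("log", 4),
   ("column", 5), ("key", 5),
   ("empty", 6), ("no data", 6),
   ("import", 7), ("module", 7),
   ("format", 8), ("invalid", 8)]

-- module-level LABEL dict: rank → context label
def pvLABEL : PySem.Dict Int String :=
  PySem.Dict.ofList
    [(0, "invalid_database"), (2, "input_file"), (3, "output_dir"), (4, "log_dir"),
     (5, "missing_column"), (7, "missing_dependency"), (8, "invalid_format"),
     (9, "general")]

def determine_context_py_alt (error_message : String) (error_type : String) : String :=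
  let el := PySem.Str.lower error_message
  let best : Int :=
    if PySem.Str.isIn "database" el &&
        (PySem.Str.isIn "invalid" el || PySem.Str.isIn "wrong" el) then 0
    else
      -- min((r for k, r in RANK if k in el), default=9): all ranks ≤ 8 < 9, so the
      -- running-minimum fold started at the default 9 computes exactly this min.
      pvRANK.foldl (fun m p => if PySem.Str.isIn p.1 el then min m p.2 else m) 9
  if best == 1 then
    if PySem.Str.isIn "database" el || PySem.Str.isIn ".csv" el then "database_file"
    else "invalid_database"
  else if best == 6 then
    if error_type == "ValueError" then "empty_input" else "empty_database"
  else
    -- LABEL[best]: best is always a key here, so the lookup never misses ("" unreachable)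
    (PySem.Dict.get? pvLABEL best).getD ""

-- ===== PRECONDITION & SPEC =====
def Spec_determine_context_py (error_message : String) (error_type : String) (out : String) : Prop := out = determine_context_py_alt error_message error_type
instance (error_message : String) (error_type : String) (out : String) : Decidable (Spec_determine_context_py error_message error_type out) := by unfold Spec_determine_context_py; infer_instance

-- ===== CLAIM =====
def Claim_equal_determine_context_py : Prop := ∀ (error_message : String) (error_type : String), Dom_determine_context_py error_message error_type → Spec_determine_context_py error_message error_type (determine_context_py error_message error_type)

-- ===== LEMMAS AND PROOFS =====
-- one step of the rank fold, with the fold function pre-applied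
theorem pv_fold_cons (el : List Char) (k : String) (r : Int) (l : List (String × Int)) (m : Int) :
    List.foldl (fun m p => if PySem.Chars.isIn p.1.toList el = true then min m p.2 else m) m ((k, r) :: l)
      = List.foldl (fun m p => if PySem.Chars.isIn p.1.toList el = true then min m p.2 else m)
          (if PySem.Chars.isIn k.toList el = true then min m r else m) l := rfl

-- once the accumulator is ≤ every remaining rank, the fold leaves it unchanged
theorem pv_foldl_min_skip (el : List Char) (l : List (String × Int)) (m : Int)
    (h : ∀ p ∈ l, m ≤ p.2) :
    l.foldl (fun m p => if PySem.Chars.isIn p.1.toList el = true then min m p.2 else m) m = m := by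
  induction l generalizing m with
  | nil => rfl
  | cons a t ih =>
    rw [pv_fold_cons]
    have ha : min m a.2 = m := min_eq_left (h a (List.mem_cons_self ..))
    by_cases hc : PySem.Chars.isIn a.1.toList el = true
    · rw [if_pos hc, ha]; exact ih m fun p hp => h p (List.mem_cons_of_mem _ hp)
    · rw [if_neg hc]; exact ih m fun p hp => h p (List.mem_cons_of_mem _ hp)

-- the rank fold yields the least rank whose keyword group has a hit (9 if none), char-list level
theorem pvRANK_fold_char_chars (el : List Char) :
    List.foldl (fun m p => if PySem.Chars.isIn p.1.toList el = true then min m p.2 else m) (9 : Int)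
      ([("biorempp", 1), ("hadeg", 1), ("kegg", 1), ("toxcsm", 1), ("input", 2), ("sample_data", 2), ("output", 3), ("results", 3), ("log", 4), ("column", 5), ("key", 5), ("empty", 6), ("no data", 6), ("import", 7), ("module", 7), ("format", 8), ("invalid", 8)] : List (String × Int)) =
      (if (PySem.Chars.isIn "biorempp".toList el || (PySem.Chars.isIn "hadeg".toList el || (PySem.Chars.isIn "kegg".toList el || PySem.Chars.isIn "toxcsm".toList el))) = true then 1
       else if (PySem.Chars.isIn "input".toList el || PySem.Chars.isIn "sample_data".toList el) = true then 2
       else if (PySem.Chars.isIn "output".toList el || PySem.Chars.isIn "results".toList el) = true then 3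
       else if (PySem.Chars.isIn "log".toList el) = true then 4
       else if (PySem.Chars.isIn "column".toList el || PySem.Chars.isIn "key".toList el) = true then 5
       else if (PySem.Chars.isIn "empty".toList el || PySem.Chars.isIn "no data".toList el) = true then 6
       else if (PySem.Chars.isIn "import".toList el || PySem.Chars.isIn "module".toList el) = true then 7
       else if (PySem.Chars.isIn "format".toList el || PySem.Chars.isIn "invalid".toList el) = true then 8
       else 9) := by
  by_cases h1 : PySem.Chars.isIn "biorempp".toList el = true
  · rw [pv_fold_cons, if_pos h1, show min (9:Int) 1 = 1 from by norm_num]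
    rw [pv_foldl_min_skip el [("hadeg", 1), ("kegg", 1), ("toxcsm", 1), ("input", 2), ("sample_data", 2), ("output", 3), ("results", 3), ("log", 4), ("column", 5), ("key", 5), ("empty", 6), ("no data", 6), ("import", 7), ("module", 7), ("format", 8), ("invalid", 8)] 1 (by decide)]
    rw [if_pos (by simp only [Bool.or_eq_true]; exact Or.inl h1)]
  · rw [pv_fold_cons, if_neg h1]
    by_cases h2 : PySem.Chars.isIn "hadeg".toList el = true
    · rw [pv_fold_cons, if_pos h2, show min (9:Int) 1 = 1 from by norm_num]
      rw [pv_foldl_min_skip el [("kegg", 1), ("toxcsm", 1), ("input", 2), ("sample_data", 2), ("output", 3), ("results", 3), ("log", 4), ("column", 5), ("key", 5), ("empty", 6), ("no data", 6), ("import", 7), ("module", 7), ("format", 8), ("invalid", 8)] 1 (by decide)]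
      rw [if_pos (by simp only [Bool.or_eq_true]; exact Or.inr (Or.inl h2))]
    · rw [pv_fold_cons, if_neg h2]
      by_cases h3 : PySem.Chars.isIn "kegg".toList el = true
      · rw [pv_fold_cons, if_pos h3, show min (9:Int) 1 = 1 from by norm_num]
        rw [pv_foldl_min_skip el [("toxcsm", 1), ("input", 2), ("sample_data", 2), ("output", 3), ("results", 3), ("log", 4), ("column", 5), ("key", 5), ("empty", 6), ("no data", 6), ("import", 7), ("module", 7), ("format", 8), ("invalid", 8)] 1 (by decide)]
        rw [if_pos (by simp only [Bool.or_eq_true]; exact Or.inr (Or.inr (Or.inl h3)))]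
      · rw [pv_fold_cons, if_neg h3]
        by_cases h4 : PySem.Chars.isIn "toxcsm".toList el = true
        · rw [pv_fold_cons, if_pos h4, show min (9:Int) 1 = 1 from by norm_num]
          rw [pv_foldl_min_skip el [("input", 2), ("sample_data", 2), ("output", 3), ("results", 3), ("log", 4), ("column", 5), ("key", 5), ("empty", 6), ("no data", 6), ("import", 7), ("module", 7), ("format", 8), ("invalid", 8)] 1 (by decide)]
          rw [if_pos (by simp only [Bool.or_eq_true]; exact Or.inr (Or.inr (Or.inr (h4))))]
        · rw [pv_fold_cons, if_neg h4]
          by_cases h5 : PySem.Chars.isIn "input".toList el = true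
          · rw [pv_fold_cons, if_pos h5, show min (9:Int) 2 = 2 from by norm_num]
            rw [pv_foldl_min_skip el [("sample_data", 2), ("output", 3), ("results", 3), ("log", 4), ("column", 5), ("key", 5), ("empty", 6), ("no data", 6), ("import", 7), ("module", 7), ("format", 8), ("invalid", 8)] 2 (by decide)]
            rw [if_neg (by simp only [Bool.or_eq_true, not_or]; exact ⟨h1, h2, h3, h4⟩), if_pos (by simp only [Bool.or_eq_true]; exact Or.inl h5)]
          · rw [pv_fold_cons, if_neg h5]
            by_cases h6 : PySem.Chars.isIn "sample_data".toList el = true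
            · rw [pv_fold_cons, if_pos h6, show min (9:Int) 2 = 2 from by norm_num]
              rw [pv_foldl_min_skip el [("output", 3), ("results", 3), ("log", 4), ("column", 5), ("key", 5), ("empty", 6), ("no data", 6), ("import", 7), ("module", 7), ("format", 8), ("invalid", 8)] 2 (by decide)]
              rw [if_neg (by simp only [Bool.or_eq_true, not_or]; exact ⟨h1, h2, h3, h4⟩), if_pos (by simp only [Bool.or_eq_true]; exact Or.inr (h6))]
            · rw [pv_fold_cons, if_neg h6]
              by_cases h7 : PySem.Chars.isIn "output".toList el = true
              · rw [pv_fold_cons, if_pos h7, show min (9:Int) 3 = 3 from by norm_num]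
                rw [pv_foldl_min_skip el [("results", 3), ("log", 4), ("column", 5), ("key", 5), ("empty", 6), ("no data", 6), ("import", 7), ("module", 7), ("format", 8), ("invalid", 8)] 3 (by decide)]
                rw [if_neg (by simp only [Bool.or_eq_true, not_or]; exact ⟨h1, h2, h3, h4⟩), if_neg (by simp only [Bool.or_eq_true, not_or]; exact ⟨h5, h6⟩), if_pos (by simp only [Bool.or_eq_true]; exact Or.inl h7)]
              · rw [pv_fold_cons, if_neg h7]
                by_cases h8 : PySem.Chars.isIn "results".toList el = true
                · rw [pv_fold_cons, if_pos h8, show min (9:Int) 3 = 3 from by norm_num]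
                  rw [pv_foldl_min_skip el [("log", 4), ("column", 5), ("key", 5), ("empty", 6), ("no data", 6), ("import", 7), ("module", 7), ("format", 8), ("invalid", 8)] 3 (by decide)]
                  rw [if_neg (by simp only [Bool.or_eq_true, not_or]; exact ⟨h1, h2, h3, h4⟩), if_neg (by simp only [Bool.or_eq_true, not_or]; exact ⟨h5, h6⟩), if_pos (by simp only [Bool.or_eq_true]; exact Or.inr (h8))]
                · rw [pv_fold_cons, if_neg h8]
                  by_cases h9 : PySem.Chars.isIn "log".toList el = true
                  · rw [pv_fold_cons, if_pos h9, show min (9:Int) 4 = 4 from by norm_num]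
                    rw [pv_foldl_min_skip el [("column", 5), ("key", 5), ("empty", 6), ("no data", 6), ("import", 7), ("module", 7), ("format", 8), ("invalid", 8)] 4 (by decide)]
                    rw [if_neg (by simp only [Bool.or_eq_true, not_or]; exact ⟨h1, h2, h3, h4⟩), if_neg (by simp only [Bool.or_eq_true, not_or]; exact ⟨h5, h6⟩), if_neg (by simp only [Bool.or_eq_true, not_or]; exact ⟨h7, h8⟩), if_pos h9]
                  · rw [pv_fold_cons, if_neg h9]
                    by_cases h10 : PySem.Chars.isIn "column".toList el = true
                    · rw [pv_fold_cons, if_pos h10, show min (9:Int) 5 = 5 from by norm_num]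
                      rw [pv_foldl_min_skip el [("key", 5), ("empty", 6), ("no data", 6), ("import", 7), ("module", 7), ("format", 8), ("invalid", 8)] 5 (by decide)]
                      rw [if_neg (by simp only [Bool.or_eq_true, not_or]; exact ⟨h1, h2, h3, h4⟩), if_neg (by simp only [Bool.or_eq_true, not_or]; exact ⟨h5, h6⟩), if_neg (by simp only [Bool.or_eq_true, not_or]; exact ⟨h7, h8⟩), if_neg h9, if_pos (by simp only [Bool.or_eq_true]; exact Or.inl h10)]
                    · rw [pv_fold_cons, if_neg h10]
                      by_cases h11 : PySem.Chars.isIn "key".toList el = true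
                      · rw [pv_fold_cons, if_pos h11, show min (9:Int) 5 = 5 from by norm_num]
                        rw [pv_foldl_min_skip el [("empty", 6), ("no data", 6), ("import", 7), ("module", 7), ("format", 8), ("invalid", 8)] 5 (by decide)]
                        rw [if_neg (by simp only [Bool.or_eq_true, not_or]; exact ⟨h1, h2, h3, h4⟩), if_neg (by simp only [Bool.or_eq_true, not_or]; exact ⟨h5, h6⟩), if_neg (by simp only [Bool.or_eq_true, not_or]; exact ⟨h7, h8⟩), if_neg h9, if_pos (by simp only [Bool.or_eq_true]; exact Or.inr (h11))]
                      · rw [pv_fold_cons, if_neg h11]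
                        by_cases h12 : PySem.Chars.isIn "empty".toList el = true
                        · rw [pv_fold_cons, if_pos h12, show min (9:Int) 6 = 6 from by norm_num]
                          rw [pv_foldl_min_skip el [("no data", 6), ("import", 7), ("module", 7), ("format", 8), ("invalid", 8)] 6 (by decide)]
                          rw [if_neg (by simp only [Bool.or_eq_true, not_or]; exact ⟨h1, h2, h3, h4⟩), if_neg (by simp only [Bool.or_eq_true, not_or]; exact ⟨h5, h6⟩), if_neg (by simp only [Bool.or_eq_true, not_or]; exact ⟨h7, h8⟩), if_neg h9, if_neg (by simp only [Bool.or_eq_true, not_or]; exact ⟨h10, h11⟩), if_pos (by simp only [Bool.or_eq_true]; exact Or.inl h12)]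
                        · rw [pv_fold_cons, if_neg h12]
                          by_cases h13 : PySem.Chars.isIn "no data".toList el = true
                          · rw [pv_fold_cons, if_pos h13, show min (9:Int) 6 = 6 from by norm_num]
                            rw [pv_foldl_min_skip el [("import", 7), ("module", 7), ("format", 8), ("invalid", 8)] 6 (by decide)]
                            rw [if_neg (by simp only [Bool.or_eq_true, not_or]; exact ⟨h1, h2, h3, h4⟩), if_neg (by simp only [Bool.or_eq_true, not_or]; exact ⟨h5, h6⟩), if_neg (by simp only [Bool.or_eq_true, not_or]; exact ⟨h7, h8⟩), if_neg h9, if_neg (by simp only [Bool.or_eq_true, not_or]; exact ⟨h10, h11⟩), if_pos (by simp only [Bool.or_eq_true]; exact Or.inr (h13))]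
                          · rw [pv_fold_cons, if_neg h13]
                            by_cases h14 : PySem.Chars.isIn "import".toList el = true
                            · rw [pv_fold_cons, if_pos h14, show min (9:Int) 7 = 7 from by norm_num]
                              rw [pv_foldl_min_skip el [("module", 7), ("format", 8), ("invalid", 8)] 7 (by decide)]
                              rw [if_neg (by simp only [Bool.or_eq_true, not_or]; exact ⟨h1, h2, h3, h4⟩), if_neg (by simp only [Bool.or_eq_true, not_or]; exact ⟨h5, h6⟩), if_neg (by simp only [Bool.or_eq_true, not_or]; exact ⟨h7, h8⟩), if_neg h9, if_neg (by simp only [Bool.or_eq_true, not_or]; exact ⟨h10, h11⟩), if_neg (by simp only [Bool.or_eq_true, not_or]; exact ⟨h12, h13⟩), if_pos (by simp only [Bool.or_eq_true]; exact Or.inl h14)]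
                            · rw [pv_fold_cons, if_neg h14]
                              by_cases h15 : PySem.Chars.isIn "module".toList el = true
                              · rw [pv_fold_cons, if_pos h15, show min (9:Int) 7 = 7 from by norm_num]
                                rw [pv_foldl_min_skip el [("format", 8), ("invalid", 8)] 7 (by decide)]
                                rw [if_neg (by simp only [Bool.or_eq_true, not_or]; exact ⟨h1, h2, h3, h4⟩), if_neg (by simp only [Bool.or_eq_true, not_or]; exact ⟨h5, h6⟩), if_neg (by simp only [Bool.or_eq_true, not_or]; exact ⟨h7, h8⟩), if_neg h9, if_neg (by simp only [Bool.or_eq_true, not_or]; exact ⟨h10, h11⟩), if_neg (by simp only [Bool.or_eq_true, not_or]; exact ⟨h12, h13⟩), if_pos (by simp only [Bool.or_eq_true]; exact Or.inr (h15))]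
                              · rw [pv_fold_cons, if_neg h15]
                                by_cases h16 : PySem.Chars.isIn "format".toList el = true
                                · rw [pv_fold_cons, if_pos h16, show min (9:Int) 8 = 8 from by norm_num]
                                  rw [pv_foldl_min_skip el [("invalid", 8)] 8 (by decide)]
                                  rw [if_neg (by simp only [Bool.or_eq_true, not_or]; exact ⟨h1, h2, h3, h4⟩), if_neg (by simp only [Bool.or_eq_true, not_or]; exact ⟨h5, h6⟩), if_neg (by simp only [Bool.or_eq_true, not_or]; exact ⟨h7, h8⟩), if_neg h9, if_neg (by simp only [Bool.or_eq_true, not_or]; exact ⟨h10, h11⟩), if_neg (by simp only [Bool.or_eq_true, not_or]; exact ⟨h12, h13⟩), if_neg (by simp only [Bool.or_eq_true, not_or]; exact ⟨h14, h15⟩), if_pos (by simp only [Bool.or_eq_true]; exact Or.inl h16)]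
                                · rw [pv_fold_cons, if_neg h16]
                                  by_cases h17 : PySem.Chars.isIn "invalid".toList el = true
                                  · rw [pv_fold_cons, if_pos h17, show min (9:Int) 8 = 8 from by norm_num]
                                    rw [pv_foldl_min_skip el [] 8 (by decide)]
                                    rw [if_neg (by simp only [Bool.or_eq_true, not_or]; exact ⟨h1, h2, h3, h4⟩), if_neg (by simp only [Bool.or_eq_true, not_or]; exact ⟨h5, h6⟩), if_neg (by simp only [Bool.or_eq_true, not_or]; exact ⟨h7, h8⟩), if_neg h9, if_neg (by simp only [Bool.or_eq_true, not_or]; exact ⟨h10, h11⟩), if_neg (by simp only [Bool.or_eq_true, not_or]; exact ⟨h12, h13⟩), if_neg (by simp only [Bool.or_eq_true, not_or]; exact ⟨h14, h15⟩), if_pos (by simp only [Bool.or_eq_true]; exact Or.inr (h17))]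
                                  · rw [pv_fold_cons, if_neg h17]
                                    rw [List.foldl_nil, if_neg (by simp only [Bool.or_eq_true, not_or]; exact ⟨h1, h2, h3, h4⟩), if_neg (by simp only [Bool.or_eq_true, not_or]; exact ⟨h5, h6⟩), if_neg (by simp only [Bool.or_eq_true, not_or]; exact ⟨h7, h8⟩), if_neg h9, if_neg (by simp only [Bool.or_eq_true, not_or]; exact ⟨h10, h11⟩), if_neg (by simp only [Bool.or_eq_true, not_or]; exact ⟨h12, h13⟩), if_neg (by simp only [Bool.or_eq_true, not_or]; exact ⟨h14, h15⟩), if_neg (by simp only [Bool.or_eq_true, not_or]; exact ⟨h16, h17⟩)]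

-- string-level version, phrased on the port's own fold
theorem pvRANK_fold_char (el : String) :
    pvRANK.foldl (fun m p => if PySem.Str.isIn p.1 el then min m p.2 else m) 9 =
      (if PySem.Str.isIn "biorempp" el || (PySem.Str.isIn "hadeg" el ||
          (PySem.Str.isIn "kegg" el || PySem.Str.isIn "toxcsm" el)) then 1
       else if PySem.Str.isIn "input" el || PySem.Str.isIn "sample_data" el then 2
       else if PySem.Str.isIn "output" el || PySem.Str.isIn "results" el then 3
       else if PySem.Str.isIn "log" el then 4
       else if PySem.Str.isIn "column" el || PySem.Str.isIn "key" el then 5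
       else if PySem.Str.isIn "empty" el || PySem.Str.isIn "no data" el then 6
       else if PySem.Str.isIn "import" el || PySem.Str.isIn "module" el then 7
       else if PySem.Str.isIn "format" el || PySem.Str.isIn "invalid" el then 8
       else 9) := by
  simp only [PySem.Str.isIn_eq, pvRANK]
  exact pvRANK_fold_char_chars el.toList

-- ===== VERDICT =====
theorem determine_context_py_spec : Claim_equal_determine_context_py := by
  intro em et _
  unfold Spec_determine_context_py
  simp only [determine_context_py, determine_context_py_alt, pvRANK_fold_char,
    List.any_cons, List.any_nil, Bool.or_false]
  generalize (PySem.Str.isIn "database" (PySem.Str.lower em) && (PySem.Str.isIn "invalid" (PySem.Str.lower em) || PySem.Str.isIn "wrong" (PySem.Str.lower em))) = c0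
  generalize (PySem.Str.isIn "biorempp" (PySem.Str.lower em) || (PySem.Str.isIn "hadeg" (PySem.Str.lower em) || (PySem.Str.isIn "kegg" (PySem.Str.lower em) || PySem.Str.isIn "toxcsm" (PySem.Str.lower em)))) = c1
  generalize (PySem.Str.isIn "database" (PySem.Str.lower em) || PySem.Str.isIn ".csv" (PySem.Str.lower em)) = c1s
  generalize (PySem.Str.isIn "input" (PySem.Str.lower em) || PySem.Str.isIn "sample_data" (PySem.Str.lower em)) = c2
  generalize (PySem.Str.isIn "output" (PySem.Str.lower em) || PySem.Str.isIn "results" (PySem.Str.lower em)) = c3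
  generalize PySem.Str.isIn "log" (PySem.Str.lower em) = c4
  generalize (PySem.Str.isIn "column" (PySem.Str.lower em) || PySem.Str.isIn "key" (PySem.Str.lower em)) = c5
  generalize (PySem.Str.isIn "empty" (PySem.Str.lower em) || PySem.Str.isIn "no data" (PySem.Str.lower em)) = c6
  generalize (et == "ValueError") = cet
  generalize (PySem.Str.isIn "import" (PySem.Str.lower em) || PySem.Str.isIn "module" (PySem.Str.lower em)) = c7
  generalize (PySem.Str.isIn "format" (PySem.Str.lower em) || PySem.Str.isIn "invalid" (PySem.Str.lower em)) = c8
  revert c0 c1 c1s c2 c3 c4 c5 c6 cet c7 c8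
  decide
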